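-- pv_equiv track=rewrite | github.com/iptch/2023-advent-of-code | DHE/day1.py | get_subline_number
-- ===== SOURCE A (Python) =====
-- DIGITSTRINGS = [
--     'one',
--     'two',
--     'three',
--     'four',
--     'five',
--     'six',
--     'seven',
--     'eight',
--     'nine'
-- ]
--
-- def get_subline_number(subline, starts=True):
--     for i in range(9):
--         if (starts):
--             if subline.startswith(DIGITSTRINGS[i]):
--                 return i + 1, len(DIGITSTRINGS[i])
--         else:
--             if subline.endswith(DIGITSTRINGS[i]):
--                 return i + 1, len(DIGITSTRINGS[i])
--     return 0, 0
-- ===== SOURCE B (Python) =====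
-- # Table lookup: map each digit word to (value, length) and probe the three
-- # possible slice lengths instead of testing all nine words in sequence.
-- _WORDS = {
--     'one': (1, 3), 'two': (2, 3), 'six': (6, 3),
--     'four': (4, 4), 'five': (5, 4), 'nine': (9, 4),
--     'three': (3, 5), 'seven': (7, 5), 'eight': (8, 5),
-- }
--
-- def get_subline_number(subline, starts=True):
--     for k in (3, 4, 5):
--         piece = subline[:k] if starts else subline[-k:]
--         hit = _WORDS.get(piece)
--         if hit is not None:
--             return hit
--     return 0, 0
-- ===== Notes on version B (the rewrite author's own statement) =====
-- stated objective: idiomatic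
-- what changed: Replaces the nine sequential startswith/endswith tests with a dict keyed by digit word mapping to (value, length), probed with the three candidate prefix/suffix slices of lengths 3, 4 and 5 (no two digit words are a prefix/suffix of one another, so at most one probe can hit).
import Mathlib
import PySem

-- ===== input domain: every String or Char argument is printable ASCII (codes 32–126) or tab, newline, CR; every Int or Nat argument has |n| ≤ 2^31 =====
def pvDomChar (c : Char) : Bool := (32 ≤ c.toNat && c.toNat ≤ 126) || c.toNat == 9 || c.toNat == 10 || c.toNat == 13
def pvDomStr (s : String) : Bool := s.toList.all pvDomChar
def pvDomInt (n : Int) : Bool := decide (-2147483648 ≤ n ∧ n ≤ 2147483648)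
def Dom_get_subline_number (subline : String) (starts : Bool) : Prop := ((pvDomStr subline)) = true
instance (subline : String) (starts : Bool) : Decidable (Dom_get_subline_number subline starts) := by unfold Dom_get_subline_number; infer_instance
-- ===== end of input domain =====

-- B replaces A's nine sequential startswith/endswith tests by a word → (value, length)
-- table probed with the three candidate slices of lengths 3, 4, 5 (idiomatic, same cost).

-- ===== PORT A =====
def DIGITSTRINGS : List String :=
  ["one", "two", "three", "four", "five", "six", "seven", "eight", "nine"]

def goA (subline : String) (starts : Bool) : List Int → Int × Int
  | [] => (0, 0)
  | i :: rest =>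
    match PySem.List.pyGet? DIGITSTRINGS i with
    | none => (0, 0)  -- unreachable: i runs over 0..8, always a valid index
    | some w =>
      if starts then
        if PySem.Str.startswith subline w then (i + 1, PySem.Str.len w)
        else goA subline starts rest
      else
        if PySem.Str.endswith subline w then (i + 1, PySem.Str.len w)
        else goA subline starts rest

def get_subline_number (subline : String) (starts : Bool) : Int × Int :=
  goA subline starts (PySem.List.pyRange 0 9 1)

-- ===== PORT B =====
def WORD_INFO : PySem.Dict String (Int × Int) :=
  PySem.Dict.ofList
    [("one", (1, 3)), ("two", (2, 3)), ("six", (6, 3)),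
     ("four", (4, 4)), ("five", (5, 4)), ("nine", (9, 4)),
     ("three", (3, 5)), ("seven", (7, 5)), ("eight", (8, 5))]

def goB (subline : String) (starts : Bool) : List Int → Int × Int
  | [] => (0, 0)
  | k :: rest =>
    let piece := if starts then PySem.Str.slice subline none (some k)
                 else PySem.Str.slice subline (some (-k)) none
    match PySem.Dict.get? WORD_INFO piece with
    | some hit => hit
    | none => goB subline starts rest

def get_subline_number_alt (subline : String) (starts : Bool) : Int × Int :=
  goB subline starts [3, 4, 5]

-- ===== PRECONDITION & SPEC =====
def Spec_get_subline_number (subline : String) (starts : Bool) (out : Int × Int) : Prop := out = get_subline_number_alt subline starts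
instance (subline : String) (starts : Bool) (out : Int × Int) : Decidable (Spec_get_subline_number subline starts out) := by unfold Spec_get_subline_number; infer_instance

-- ===== CLAIM (what is proved, stated in full; the proofs are below) =====
def Claim_equal_get_subline_number : Prop := ∀ (subline : String) (starts : Bool), Dom_get_subline_number subline starts → Spec_get_subline_number subline starts (get_subline_number subline starts)

-- ===== LEMMAS AND PROOFS =====

lemma startswith_decide (s w : String) :
    PySem.Str.startswith s w = decide (s.toList.take w.toList.length = w.toList) := by
  simp only [PySem.Str.startswith_eq]
  rw [Bool.eq_iff_iff]
  simp only [PySem.Chars.startswith_iff, decide_eq_true_eq]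
  constructor
  · intro h; exact (List.prefix_iff_eq_take.mp h).symm
  · intro h; exact List.prefix_iff_eq_take.mpr h.symm

lemma endswith_decide (s w : String) :
    PySem.Str.endswith s w = decide (s.toList.drop (s.toList.length - w.toList.length) = w.toList) := by
  simp only [PySem.Str.endswith_eq]
  rw [Bool.eq_iff_iff]
  simp only [PySem.Chars.endswith_iff, decide_eq_true_eq]
  constructor
  · intro h; exact (List.suffix_iff_eq_drop.mp h).symm
  · intro h; exact List.suffix_iff_eq_drop.mpr h.symm

-- a match of a longer prefix determines the shorter prefixes
lemma take_shift {t w : List Char} (j : Nat) {k : Nat} (hjk : j ≤ k) (h : t.take k = w) :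
    t.take j = w.take j := by
  rw [← h, List.take_take, Nat.min_eq_left hjk]

-- a match of a k-length word at the end determines the shorter suffixes
lemma drop_shift {t w : List Char} (j : Nat) {k : Nat} (hjk : j ≤ k) (hw : w.length = k)
    (h : t.drop (t.length - k) = w) : t.drop (t.length - j) = w.drop (k - j) := by
  have hl : (t.drop (t.length - k)).length = w.length := congrArg List.length h
  simp only [List.length_drop] at hl
  have hk : k ≤ t.length := by omega
  rw [← h, List.drop_drop]
  congr 1
  omega

-- a k-suffix slice equal to a j-length word (j ≤ k) forces the j-suffix slice to equal it
lemma drop_absorb {t w : List Char} {j k : Nat} (hjk : j ≤ k) (hw : w.length = j)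
    (h : t.drop (t.length - k) = w) : t.drop (t.length - j) = w := by
  have hl : (t.drop (t.length - k)).length = w.length := congrArg List.length h
  simp only [List.length_drop] at hl
  rw [show t.length - j = t.length - k by omega]
  exact h

lemma take_ne_of_lt {t w : List Char} {k : Nat} (h : k < w.length) : t.take k ≠ w := by
  intro he
  have := congrArg List.length he
  simp only [List.length_take] at this
  omega

lemma drop_ne_of_lt {t w : List Char} {k : Nat} (h : k < w.length) :
    t.drop (t.length - k) ≠ w := by
  intro he
  have := congrArg List.length he
  simp only [List.length_drop] at this
  omega

lemma lookup_eval (p : String) : PySem.Dict.get? WORD_INFO p =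
    if p.toList = "one".toList then some (1, 3)
    else if p.toList = "two".toList then some (2, 3)
    else if p.toList = "six".toList then some (6, 3)
    else if p.toList = "four".toList then some (4, 4)
    else if p.toList = "five".toList then some (5, 4)
    else if p.toList = "nine".toList then some (9, 4)
    else if p.toList = "three".toList then some (3, 5)
    else if p.toList = "seven".toList then some (7, 5)
    else if p.toList = "eight".toList then some (8, 5)
    else none := by
  have hw : WORD_INFO = PySem.Dict.mk
    [("one", (1, 3)), ("two", (2, 3)), ("six", (6, 3)),
     ("four", (4, 4)), ("five", (5, 4)), ("nine", (9, 4)),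
     ("three", (3, 5)), ("seven", (7, 5)), ("eight", (8, 5))] := by decide
  rw [hw]
  simp only [PySem.Dict.get?_mk_cons, beq_iff_eq,
    @eq_comm String "one", @eq_comm String "two", @eq_comm String "six",
    @eq_comm String "four", @eq_comm String "five", @eq_comm String "nine",
    @eq_comm String "three", @eq_comm String "seven", @eq_comm String "eight",
    String.ext_iff]
  simp [PySem.Dict.get?]
  split_ifs <;> rfl

lemma goB_cons_true (s : String) (k : Int) (rest : List Int) :
    goB s true (k :: rest) =
      (if (PySem.Str.slice s none (some k)).toList = "one".toList then (1, 3)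
       else if (PySem.Str.slice s none (some k)).toList = "two".toList then (2, 3)
       else if (PySem.Str.slice s none (some k)).toList = "six".toList then (6, 3)
       else if (PySem.Str.slice s none (some k)).toList = "four".toList then (4, 4)
       else if (PySem.Str.slice s none (some k)).toList = "five".toList then (5, 4)
       else if (PySem.Str.slice s none (some k)).toList = "nine".toList then (9, 4)
       else if (PySem.Str.slice s none (some k)).toList = "three".toList then (3, 5)
       else if (PySem.Str.slice s none (some k)).toList = "seven".toList then (7, 5)
       else if (PySem.Str.slice s none (some k)).toList = "eight".toList then (8, 5)
       else goB s true rest) := by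
  simp only [goB, if_true]
  rw [lookup_eval]
  split_ifs <;> rfl

lemma goB_cons_false (s : String) (k : Int) (rest : List Int) :
    goB s false (k :: rest) =
      (if (PySem.Str.slice s (some (-k)) none).toList = "one".toList then (1, 3)
       else if (PySem.Str.slice s (some (-k)) none).toList = "two".toList then (2, 3)
       else if (PySem.Str.slice s (some (-k)) none).toList = "six".toList then (6, 3)
       else if (PySem.Str.slice s (some (-k)) none).toList = "four".toList then (4, 4)
       else if (PySem.Str.slice s (some (-k)) none).toList = "five".toList then (5, 4)
       else if (PySem.Str.slice s (some (-k)) none).toList = "nine".toList then (9, 4)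
       else if (PySem.Str.slice s (some (-k)) none).toList = "three".toList then (3, 5)
       else if (PySem.Str.slice s (some (-k)) none).toList = "seven".toList then (7, 5)
       else if (PySem.Str.slice s (some (-k)) none).toList = "eight".toList then (8, 5)
       else goB s false rest) := by
  simp only [goB, if_false, Bool.false_eq_true]
  rw [lookup_eval]
  split_ifs <;> rfl

lemma A_true (s : String) : get_subline_number s true =
    (if s.toList.take 3 = ['o', 'n', 'e'] then ((1 : Int), (3 : Int))
     else if s.toList.take 3 = ['t', 'w', 'o'] then (2, 3)
     else if s.toList.take 5 = ['t', 'h', 'r', 'e', 'e'] then (3, 5)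
     else if s.toList.take 4 = ['f', 'o', 'u', 'r'] then (4, 4)
     else if s.toList.take 4 = ['f', 'i', 'v', 'e'] then (5, 4)
     else if s.toList.take 3 = ['s', 'i', 'x'] then (6, 3)
     else if s.toList.take 5 = ['s', 'e', 'v', 'e', 'n'] then (7, 5)
     else if s.toList.take 5 = ['e', 'i', 'g', 'h', 't'] then (8, 5)
     else if s.toList.take 4 = ['n', 'i', 'n', 'e'] then (9, 4)
     else (0, 0)) := by
  have hr : PySem.List.pyRange 0 9 1 = [0, 1, 2, 3, 4, 5, 6, 7, 8] := by decide
  have g0 : PySem.List.pyGet? DIGITSTRINGS 0 = some "one" := by decide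
  have g1 : PySem.List.pyGet? DIGITSTRINGS 1 = some "two" := by decide
  have g2 : PySem.List.pyGet? DIGITSTRINGS 2 = some "three" := by decide
  have g3 : PySem.List.pyGet? DIGITSTRINGS 3 = some "four" := by decide
  have g4 : PySem.List.pyGet? DIGITSTRINGS 4 = some "five" := by decide
  have g5 : PySem.List.pyGet? DIGITSTRINGS 5 = some "six" := by decide
  have g6 : PySem.List.pyGet? DIGITSTRINGS 6 = some "seven" := by decide
  have g7 : PySem.List.pyGet? DIGITSTRINGS 7 = some "eight" := by decide
  have g8 : PySem.List.pyGet? DIGITSTRINGS 8 = some "nine" := by decide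
  have t1 : ("one" : String).toList = ['o', 'n', 'e'] := rfl
  have t2 : ("two" : String).toList = ['t', 'w', 'o'] := rfl
  have t3 : ("three" : String).toList = ['t', 'h', 'r', 'e', 'e'] := rfl
  have t4 : ("four" : String).toList = ['f', 'o', 'u', 'r'] := rfl
  have t5 : ("five" : String).toList = ['f', 'i', 'v', 'e'] := rfl
  have t6 : ("six" : String).toList = ['s', 'i', 'x'] := rfl
  have t7 : ("seven" : String).toList = ['s', 'e', 'v', 'e', 'n'] := rfl
  have t8 : ("eight" : String).toList = ['e', 'i', 'g', 'h', 't'] := rfl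
  have t9 : ("nine" : String).toList = ['n', 'i', 'n', 'e'] := rfl
  have L1 : PySem.Str.len "one" = 3 := by decide
  have L2 : PySem.Str.len "two" = 3 := by decide
  have L3 : PySem.Str.len "three" = 5 := by decide
  have L4 : PySem.Str.len "four" = 4 := by decide
  have L5 : PySem.Str.len "five" = 4 := by decide
  have L6 : PySem.Str.len "six" = 3 := by decide
  have L7 : PySem.Str.len "seven" = 5 := by decide
  have L8 : PySem.Str.len "eight" = 5 := by decide
  have L9 : PySem.Str.len "nine" = 4 := by decide
  rw [get_subline_number, hr]
  simp only [goA, g0, g1, g2, g3, g4, g5, g6, g7, g8, t1, t2, t3, t4, t5, t6, t7, t8, t9,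
    L1, L2, L3, L4, L5, L6, L7, L8, L9, startswith_decide]
  norm_num

lemma A_false (s : String) : get_subline_number s false =
    (if s.toList.drop (s.toList.length - 3) = ['o', 'n', 'e'] then ((1 : Int), (3 : Int))
     else if s.toList.drop (s.toList.length - 3) = ['t', 'w', 'o'] then (2, 3)
     else if s.toList.drop (s.toList.length - 5) = ['t', 'h', 'r', 'e', 'e'] then (3, 5)
     else if s.toList.drop (s.toList.length - 4) = ['f', 'o', 'u', 'r'] then (4, 4)
     else if s.toList.drop (s.toList.length - 4) = ['f', 'i', 'v', 'e'] then (5, 4)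
     else if s.toList.drop (s.toList.length - 3) = ['s', 'i', 'x'] then (6, 3)
     else if s.toList.drop (s.toList.length - 5) = ['s', 'e', 'v', 'e', 'n'] then (7, 5)
     else if s.toList.drop (s.toList.length - 5) = ['e', 'i', 'g', 'h', 't'] then (8, 5)
     else if s.toList.drop (s.toList.length - 4) = ['n', 'i', 'n', 'e'] then (9, 4)
     else (0, 0)) := by
  have hr : PySem.List.pyRange 0 9 1 = [0, 1, 2, 3, 4, 5, 6, 7, 8] := by decide
  have g0 : PySem.List.pyGet? DIGITSTRINGS 0 = some "one" := by decide
  have g1 : PySem.List.pyGet? DIGITSTRINGS 1 = some "two" := by decide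
  have g2 : PySem.List.pyGet? DIGITSTRINGS 2 = some "three" := by decide
  have g3 : PySem.List.pyGet? DIGITSTRINGS 3 = some "four" := by decide
  have g4 : PySem.List.pyGet? DIGITSTRINGS 4 = some "five" := by decide
  have g5 : PySem.List.pyGet? DIGITSTRINGS 5 = some "six" := by decide
  have g6 : PySem.List.pyGet? DIGITSTRINGS 6 = some "seven" := by decide
  have g7 : PySem.List.pyGet? DIGITSTRINGS 7 = some "eight" := by decide
  have g8 : PySem.List.pyGet? DIGITSTRINGS 8 = some "nine" := by decide
  have t1 : ("one" : String).toList = ['o', 'n', 'e'] := rfl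
  have t2 : ("two" : String).toList = ['t', 'w', 'o'] := rfl
  have t3 : ("three" : String).toList = ['t', 'h', 'r', 'e', 'e'] := rfl
  have t4 : ("four" : String).toList = ['f', 'o', 'u', 'r'] := rfl
  have t5 : ("five" : String).toList = ['f', 'i', 'v', 'e'] := rfl
  have t6 : ("six" : String).toList = ['s', 'i', 'x'] := rfl
  have t7 : ("seven" : String).toList = ['s', 'e', 'v', 'e', 'n'] := rfl
  have t8 : ("eight" : String).toList = ['e', 'i', 'g', 'h', 't'] := rfl
  have t9 : ("nine" : String).toList = ['n', 'i', 'n', 'e'] := rfl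
  have L1 : PySem.Str.len "one" = 3 := by decide
  have L2 : PySem.Str.len "two" = 3 := by decide
  have L3 : PySem.Str.len "three" = 5 := by decide
  have L4 : PySem.Str.len "four" = 4 := by decide
  have L5 : PySem.Str.len "five" = 4 := by decide
  have L6 : PySem.Str.len "six" = 3 := by decide
  have L7 : PySem.Str.len "seven" = 5 := by decide
  have L8 : PySem.Str.len "eight" = 5 := by decide
  have L9 : PySem.Str.len "nine" = 4 := by decide
  rw [get_subline_number, hr]
  simp only [goA, g0, g1, g2, g3, g4, g5, g6, g7, g8, t1, t2, t3, t4, t5, t6, t7, t8, t9,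
    L1, L2, L3, L4, L5, L6, L7, L8, L9, endswith_decide]
  norm_num

lemma B_true (s : String) : get_subline_number_alt s true =
    (if s.toList.take 3 = ['o', 'n', 'e'] then ((1 : Int), (3 : Int))
     else if s.toList.take 3 = ['t', 'w', 'o'] then (2, 3)
     else if s.toList.take 3 = ['s', 'i', 'x'] then (6, 3)
     else if s.toList.take 4 = ['o', 'n', 'e'] then (1, 3)
     else if s.toList.take 4 = ['t', 'w', 'o'] then (2, 3)
     else if s.toList.take 4 = ['s', 'i', 'x'] then (6, 3)
     else if s.toList.take 4 = ['f', 'o', 'u', 'r'] then (4, 4)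
     else if s.toList.take 4 = ['f', 'i', 'v', 'e'] then (5, 4)
     else if s.toList.take 4 = ['n', 'i', 'n', 'e'] then (9, 4)
     else if s.toList.take 5 = ['o', 'n', 'e'] then (1, 3)
     else if s.toList.take 5 = ['t', 'w', 'o'] then (2, 3)
     else if s.toList.take 5 = ['s', 'i', 'x'] then (6, 3)
     else if s.toList.take 5 = ['f', 'o', 'u', 'r'] then (4, 4)
     else if s.toList.take 5 = ['f', 'i', 'v', 'e'] then (5, 4)
     else if s.toList.take 5 = ['n', 'i', 'n', 'e'] then (9, 4)
     else if s.toList.take 5 = ['t', 'h', 'r', 'e', 'e'] then (3, 5)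
     else if s.toList.take 5 = ['s', 'e', 'v', 'e', 'n'] then (7, 5)
     else if s.toList.take 5 = ['e', 'i', 'g', 'h', 't'] then (8, 5)
     else (0, 0)) := by
  have p3 : (PySem.Str.slice s none (some (3 : Int))).toList = s.toList.take 3 := by simp [pysem]
  have p4 : (PySem.Str.slice s none (some (4 : Int))).toList = s.toList.take 4 := by simp [pysem]
  have p5 : (PySem.Str.slice s none (some (5 : Int))).toList = s.toList.take 5 := by simp [pysem]
  have n1 : ∀ t : List Char, t.take 3 ≠ (['f', 'o', 'u', 'r'] : List Char) :=
    fun _ => take_ne_of_lt (by norm_num)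
  have n2 : ∀ t : List Char, t.take 3 ≠ (['f', 'i', 'v', 'e'] : List Char) :=
    fun _ => take_ne_of_lt (by norm_num)
  have n3 : ∀ t : List Char, t.take 3 ≠ (['n', 'i', 'n', 'e'] : List Char) :=
    fun _ => take_ne_of_lt (by norm_num)
  have n4 : ∀ t : List Char, t.take 3 ≠ (['t', 'h', 'r', 'e', 'e'] : List Char) :=
    fun _ => take_ne_of_lt (by norm_num)
  have n5 : ∀ t : List Char, t.take 3 ≠ (['s', 'e', 'v', 'e', 'n'] : List Char) :=
    fun _ => take_ne_of_lt (by norm_num)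
  have n6 : ∀ t : List Char, t.take 3 ≠ (['e', 'i', 'g', 'h', 't'] : List Char) :=
    fun _ => take_ne_of_lt (by norm_num)
  have n7 : ∀ t : List Char, t.take 4 ≠ (['t', 'h', 'r', 'e', 'e'] : List Char) :=
    fun _ => take_ne_of_lt (by norm_num)
  have n8 : ∀ t : List Char, t.take 4 ≠ (['s', 'e', 'v', 'e', 'n'] : List Char) :=
    fun _ => take_ne_of_lt (by norm_num)
  have n9 : ∀ t : List Char, t.take 4 ≠ (['e', 'i', 'g', 'h', 't'] : List Char) :=
    fun _ => take_ne_of_lt (by norm_num)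
  have t1 : ("one" : String).toList = ['o', 'n', 'e'] := rfl
  have t2 : ("two" : String).toList = ['t', 'w', 'o'] := rfl
  have t3 : ("three" : String).toList = ['t', 'h', 'r', 'e', 'e'] := rfl
  have t4 : ("four" : String).toList = ['f', 'o', 'u', 'r'] := rfl
  have t5 : ("five" : String).toList = ['f', 'i', 'v', 'e'] := rfl
  have t6 : ("six" : String).toList = ['s', 'i', 'x'] := rfl
  have t7 : ("seven" : String).toList = ['s', 'e', 'v', 'e', 'n'] := rfl
  have t8 : ("eight" : String).toList = ['e', 'i', 'g', 'h', 't'] := rfl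
  have t9 : ("nine" : String).toList = ['n', 'i', 'n', 'e'] := rfl
  rw [get_subline_number_alt]
  rw [goB_cons_true, goB_cons_true, goB_cons_true]
  simp only [p3, p4, p5, t1, t2, t3, t4, t5, t6, t7, t8, t9, goB]
  simp only [n1, n2, n3, n4, n5, n6, n7, n8, n9, if_false]

lemma B_false (s : String) : get_subline_number_alt s false =
    (if s.toList.drop (s.toList.length - 3) = ['o', 'n', 'e'] then ((1 : Int), (3 : Int))
     else if s.toList.drop (s.toList.length - 3) = ['t', 'w', 'o'] then (2, 3)
     else if s.toList.drop (s.toList.length - 3) = ['s', 'i', 'x'] then (6, 3)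
     else if s.toList.drop (s.toList.length - 4) = ['o', 'n', 'e'] then (1, 3)
     else if s.toList.drop (s.toList.length - 4) = ['t', 'w', 'o'] then (2, 3)
     else if s.toList.drop (s.toList.length - 4) = ['s', 'i', 'x'] then (6, 3)
     else if s.toList.drop (s.toList.length - 4) = ['f', 'o', 'u', 'r'] then (4, 4)
     else if s.toList.drop (s.toList.length - 4) = ['f', 'i', 'v', 'e'] then (5, 4)
     else if s.toList.drop (s.toList.length - 4) = ['n', 'i', 'n', 'e'] then (9, 4)
     else if s.toList.drop (s.toList.length - 5) = ['o', 'n', 'e'] then (1, 3)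
     else if s.toList.drop (s.toList.length - 5) = ['t', 'w', 'o'] then (2, 3)
     else if s.toList.drop (s.toList.length - 5) = ['s', 'i', 'x'] then (6, 3)
     else if s.toList.drop (s.toList.length - 5) = ['f', 'o', 'u', 'r'] then (4, 4)
     else if s.toList.drop (s.toList.length - 5) = ['f', 'i', 'v', 'e'] then (5, 4)
     else if s.toList.drop (s.toList.length - 5) = ['n', 'i', 'n', 'e'] then (9, 4)
     else if s.toList.drop (s.toList.length - 5) = ['t', 'h', 'r', 'e', 'e'] then (3, 5)
     else if s.toList.drop (s.toList.length - 5) = ['s', 'e', 'v', 'e', 'n'] then (7, 5)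
     else if s.toList.drop (s.toList.length - 5) = ['e', 'i', 'g', 'h', 't'] then (8, 5)
     else (0, 0)) := by
  have p3 : (PySem.Str.slice s (some (-(3 : Int))) none).toList =
      s.toList.drop (s.toList.length - 3) := by simp [pysem]
  have p4 : (PySem.Str.slice s (some (-(4 : Int))) none).toList =
      s.toList.drop (s.toList.length - 4) := by simp [pysem]
  have p5 : (PySem.Str.slice s (some (-(5 : Int))) none).toList =
      s.toList.drop (s.toList.length - 5) := by simp [pysem]
  have n1 : ∀ t : List Char, t.drop (t.length - 3) ≠ (['f', 'o', 'u', 'r'] : List Char) :=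
    fun _ => drop_ne_of_lt (by norm_num)
  have n2 : ∀ t : List Char, t.drop (t.length - 3) ≠ (['f', 'i', 'v', 'e'] : List Char) :=
    fun _ => drop_ne_of_lt (by norm_num)
  have n3 : ∀ t : List Char, t.drop (t.length - 3) ≠ (['n', 'i', 'n', 'e'] : List Char) :=
    fun _ => drop_ne_of_lt (by norm_num)
  have n4 : ∀ t : List Char, t.drop (t.length - 3) ≠ (['t', 'h', 'r', 'e', 'e'] : List Char) :=
    fun _ => drop_ne_of_lt (by norm_num)
  have n5 : ∀ t : List Char, t.drop (t.length - 3) ≠ (['s', 'e', 'v', 'e', 'n'] : List Char) :=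
    fun _ => drop_ne_of_lt (by norm_num)
  have n6 : ∀ t : List Char, t.drop (t.length - 3) ≠ (['e', 'i', 'g', 'h', 't'] : List Char) :=
    fun _ => drop_ne_of_lt (by norm_num)
  have n7 : ∀ t : List Char, t.drop (t.length - 4) ≠ (['t', 'h', 'r', 'e', 'e'] : List Char) :=
    fun _ => drop_ne_of_lt (by norm_num)
  have n8 : ∀ t : List Char, t.drop (t.length - 4) ≠ (['s', 'e', 'v', 'e', 'n'] : List Char) :=
    fun _ => drop_ne_of_lt (by norm_num)
  have n9 : ∀ t : List Char, t.drop (t.length - 4) ≠ (['e', 'i', 'g', 'h', 't'] : List Char) :=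
    fun _ => drop_ne_of_lt (by norm_num)
  have t1 : ("one" : String).toList = ['o', 'n', 'e'] := rfl
  have t2 : ("two" : String).toList = ['t', 'w', 'o'] := rfl
  have t3 : ("three" : String).toList = ['t', 'h', 'r', 'e', 'e'] := rfl
  have t4 : ("four" : String).toList = ['f', 'o', 'u', 'r'] := rfl
  have t5 : ("five" : String).toList = ['f', 'i', 'v', 'e'] := rfl
  have t6 : ("six" : String).toList = ['s', 'i', 'x'] := rfl
  have t7 : ("seven" : String).toList = ['s', 'e', 'v', 'e', 'n'] := rfl
  have t8 : ("eight" : String).toList = ['e', 'i', 'g', 'h', 't'] := rfl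
  have t9 : ("nine" : String).toList = ['n', 'i', 'n', 'e'] := rfl
  rw [get_subline_number_alt]
  rw [goB_cons_false, goB_cons_false, goB_cons_false]
  simp only [p3, p4, p5, t1, t2, t3, t4, t5, t6, t7, t8, t9, goB]
  simp only [n1, n2, n3, n4, n5, n6, n7, n8, n9, if_false]

lemma key_true (t : List Char) :
    (if t.take 3 = ['o', 'n', 'e'] then ((1 : Int), (3 : Int))
     else if t.take 3 = ['t', 'w', 'o'] then (2, 3)
     else if t.take 5 = ['t', 'h', 'r', 'e', 'e'] then (3, 5)
     else if t.take 4 = ['f', 'o', 'u', 'r'] then (4, 4)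
     else if t.take 4 = ['f', 'i', 'v', 'e'] then (5, 4)
     else if t.take 3 = ['s', 'i', 'x'] then (6, 3)
     else if t.take 5 = ['s', 'e', 'v', 'e', 'n'] then (7, 5)
     else if t.take 5 = ['e', 'i', 'g', 'h', 't'] then (8, 5)
     else if t.take 4 = ['n', 'i', 'n', 'e'] then (9, 4)
     else (0, 0)) =
    (if t.take 3 = ['o', 'n', 'e'] then ((1 : Int), (3 : Int))
     else if t.take 3 = ['t', 'w', 'o'] then (2, 3)
     else if t.take 3 = ['s', 'i', 'x'] then (6, 3)
     else if t.take 4 = ['o', 'n', 'e'] then (1, 3)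
     else if t.take 4 = ['t', 'w', 'o'] then (2, 3)
     else if t.take 4 = ['s', 'i', 'x'] then (6, 3)
     else if t.take 4 = ['f', 'o', 'u', 'r'] then (4, 4)
     else if t.take 4 = ['f', 'i', 'v', 'e'] then (5, 4)
     else if t.take 4 = ['n', 'i', 'n', 'e'] then (9, 4)
     else if t.take 5 = ['o', 'n', 'e'] then (1, 3)
     else if t.take 5 = ['t', 'w', 'o'] then (2, 3)
     else if t.take 5 = ['s', 'i', 'x'] then (6, 3)
     else if t.take 5 = ['f', 'o', 'u', 'r'] then (4, 4)
     else if t.take 5 = ['f', 'i', 'v', 'e'] then (5, 4)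
     else if t.take 5 = ['n', 'i', 'n', 'e'] then (9, 4)
     else if t.take 5 = ['t', 'h', 'r', 'e', 'e'] then (3, 5)
     else if t.take 5 = ['s', 'e', 'v', 'e', 'n'] then (7, 5)
     else if t.take 5 = ['e', 'i', 'g', 'h', 't'] then (8, 5)
     else (0, 0)) := by
  by_cases h1 : t.take 3 = ['o', 'n', 'e']
  · simp [h1]
  by_cases h2 : t.take 3 = ['t', 'w', 'o']
  · simp [h1, h2]
  by_cases h3 : t.take 5 = ['t', 'h', 'r', 'e', 'e']
  · have a3 : t.take 3 = ['t', 'h', 'r'] := by simpa using take_shift 3 (by norm_num) h3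
    have a4 : t.take 4 = ['t', 'h', 'r', 'e'] := by simpa using take_shift 4 (by norm_num) h3
    simp [h3, a3, a4]
  by_cases h4 : t.take 4 = ['f', 'o', 'u', 'r']
  · have a3 : t.take 3 = ['f', 'o', 'u'] := by simpa using take_shift 3 (by norm_num) h4
    simp [h3, h4, a3]
  by_cases h5 : t.take 4 = ['f', 'i', 'v', 'e']
  · have a3 : t.take 3 = ['f', 'i', 'v'] := by simpa using take_shift 3 (by norm_num) h5
    simp [h3, h4, h5, a3]
  by_cases h6 : t.take 3 = ['s', 'i', 'x']
  · simp [h3, h4, h5, h6]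
  by_cases h7 : t.take 5 = ['s', 'e', 'v', 'e', 'n']
  · have a3 : t.take 3 = ['s', 'e', 'v'] := by simpa using take_shift 3 (by norm_num) h7
    have a4 : t.take 4 = ['s', 'e', 'v', 'e'] := by simpa using take_shift 4 (by norm_num) h7
    simp [h7, a3, a4]
  by_cases h8 : t.take 5 = ['e', 'i', 'g', 'h', 't']
  · have a3 : t.take 3 = ['e', 'i', 'g'] := by simpa using take_shift 3 (by norm_num) h8
    have a4 : t.take 4 = ['e', 'i', 'g', 'h'] := by simpa using take_shift 4 (by norm_num) h8
    simp [h8, a3, a4]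
  by_cases h9 : t.take 4 = ['n', 'i', 'n', 'e']
  · have a3 : t.take 3 = ['n', 'i', 'n'] := by simpa using take_shift 3 (by norm_num) h9
    simp [h3, h7, h8, h9, a3]
  · have b1 : t.take 4 ≠ ['o', 'n', 'e'] :=
      fun he => h1 (by simpa using take_shift 3 (by norm_num) he)
    have b2 : t.take 4 ≠ ['t', 'w', 'o'] :=
      fun he => h2 (by simpa using take_shift 3 (by norm_num) he)
    have b6 : t.take 4 ≠ ['s', 'i', 'x'] :=
      fun he => h6 (by simpa using take_shift 3 (by norm_num) he)
    have c1 : t.take 5 ≠ ['o', 'n', 'e'] :=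
      fun he => h1 (by simpa using take_shift 3 (by norm_num) he)
    have c2 : t.take 5 ≠ ['t', 'w', 'o'] :=
      fun he => h2 (by simpa using take_shift 3 (by norm_num) he)
    have c6 : t.take 5 ≠ ['s', 'i', 'x'] :=
      fun he => h6 (by simpa using take_shift 3 (by norm_num) he)
    have c4 : t.take 5 ≠ ['f', 'o', 'u', 'r'] :=
      fun he => h4 (by simpa using take_shift 4 (by norm_num) he)
    have c5 : t.take 5 ≠ ['f', 'i', 'v', 'e'] :=
      fun he => h5 (by simpa using take_shift 4 (by norm_num) he)
    have c9 : t.take 5 ≠ ['n', 'i', 'n', 'e'] :=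
      fun he => h9 (by simpa using take_shift 4 (by norm_num) he)
    simp [h1, h2, h3, h4, h5, h6, h7, h8, h9, b1, b2, b6, c1, c2, c6, c4, c5, c9]

lemma key_false (t : List Char) :
    (if t.drop (t.length - 3) = ['o', 'n', 'e'] then ((1 : Int), (3 : Int))
     else if t.drop (t.length - 3) = ['t', 'w', 'o'] then (2, 3)
     else if t.drop (t.length - 5) = ['t', 'h', 'r', 'e', 'e'] then (3, 5)
     else if t.drop (t.length - 4) = ['f', 'o', 'u', 'r'] then (4, 4)
     else if t.drop (t.length - 4) = ['f', 'i', 'v', 'e'] then (5, 4)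
     else if t.drop (t.length - 3) = ['s', 'i', 'x'] then (6, 3)
     else if t.drop (t.length - 5) = ['s', 'e', 'v', 'e', 'n'] then (7, 5)
     else if t.drop (t.length - 5) = ['e', 'i', 'g', 'h', 't'] then (8, 5)
     else if t.drop (t.length - 4) = ['n', 'i', 'n', 'e'] then (9, 4)
     else (0, 0)) =
    (if t.drop (t.length - 3) = ['o', 'n', 'e'] then ((1 : Int), (3 : Int))
     else if t.drop (t.length - 3) = ['t', 'w', 'o'] then (2, 3)
     else if t.drop (t.length - 3) = ['s', 'i', 'x'] then (6, 3)
     else if t.drop (t.length - 4) = ['o', 'n', 'e'] then (1, 3)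
     else if t.drop (t.length - 4) = ['t', 'w', 'o'] then (2, 3)
     else if t.drop (t.length - 4) = ['s', 'i', 'x'] then (6, 3)
     else if t.drop (t.length - 4) = ['f', 'o', 'u', 'r'] then (4, 4)
     else if t.drop (t.length - 4) = ['f', 'i', 'v', 'e'] then (5, 4)
     else if t.drop (t.length - 4) = ['n', 'i', 'n', 'e'] then (9, 4)
     else if t.drop (t.length - 5) = ['o', 'n', 'e'] then (1, 3)
     else if t.drop (t.length - 5) = ['t', 'w', 'o'] then (2, 3)
     else if t.drop (t.length - 5) = ['s', 'i', 'x'] then (6, 3)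
     else if t.drop (t.length - 5) = ['f', 'o', 'u', 'r'] then (4, 4)
     else if t.drop (t.length - 5) = ['f', 'i', 'v', 'e'] then (5, 4)
     else if t.drop (t.length - 5) = ['n', 'i', 'n', 'e'] then (9, 4)
     else if t.drop (t.length - 5) = ['t', 'h', 'r', 'e', 'e'] then (3, 5)
     else if t.drop (t.length - 5) = ['s', 'e', 'v', 'e', 'n'] then (7, 5)
     else if t.drop (t.length - 5) = ['e', 'i', 'g', 'h', 't'] then (8, 5)
     else (0, 0)) := by
  by_cases h1 : t.drop (t.length - 3) = ['o', 'n', 'e']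
  · simp [h1]
  by_cases h2 : t.drop (t.length - 3) = ['t', 'w', 'o']
  · simp [h1, h2]
  by_cases h3 : t.drop (t.length - 5) = ['t', 'h', 'r', 'e', 'e']
  · have a3 : t.drop (t.length - 3) = ['r', 'e', 'e'] := by
      simpa using drop_shift 3 (by norm_num) (by norm_num) h3
    have a4 : t.drop (t.length - 4) = ['h', 'r', 'e', 'e'] := by
      simpa using drop_shift 4 (by norm_num) (by norm_num) h3
    simp [h3, a3, a4]
  by_cases h4 : t.drop (t.length - 4) = ['f', 'o', 'u', 'r']
  · have a3 : t.drop (t.length - 3) = ['o', 'u', 'r'] := by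
      simpa using drop_shift 3 (by norm_num) (by norm_num) h4
    simp [h3, h4, a3]
  by_cases h5 : t.drop (t.length - 4) = ['f', 'i', 'v', 'e']
  · have a3 : t.drop (t.length - 3) = ['i', 'v', 'e'] := by
      simpa using drop_shift 3 (by norm_num) (by norm_num) h5
    simp [h3, h4, h5, a3]
  by_cases h6 : t.drop (t.length - 3) = ['s', 'i', 'x']
  · simp [h3, h4, h5, h6]
  by_cases h7 : t.drop (t.length - 5) = ['s', 'e', 'v', 'e', 'n']
  · have a3 : t.drop (t.length - 3) = ['v', 'e', 'n'] := by
      simpa using drop_shift 3 (by norm_num) (by norm_num) h7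
    have a4 : t.drop (t.length - 4) = ['e', 'v', 'e', 'n'] := by
      simpa using drop_shift 4 (by norm_num) (by norm_num) h7
    simp [h7, a3, a4]
  by_cases h8 : t.drop (t.length - 5) = ['e', 'i', 'g', 'h', 't']
  · have a3 : t.drop (t.length - 3) = ['g', 'h', 't'] := by
      simpa using drop_shift 3 (by norm_num) (by norm_num) h8
    have a4 : t.drop (t.length - 4) = ['i', 'g', 'h', 't'] := by
      simpa using drop_shift 4 (by norm_num) (by norm_num) h8
    simp [h8, a3, a4]
  by_cases h9 : t.drop (t.length - 4) = ['n', 'i', 'n', 'e']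
  · have a3 : t.drop (t.length - 3) = ['i', 'n', 'e'] := by
      simpa using drop_shift 3 (by norm_num) (by norm_num) h9
    simp [h3, h7, h8, h9, a3]
  · have b1 : t.drop (t.length - 4) ≠ ['o', 'n', 'e'] :=
      fun he => h1 (drop_absorb (by norm_num) (by norm_num) he)
    have b2 : t.drop (t.length - 4) ≠ ['t', 'w', 'o'] :=
      fun he => h2 (drop_absorb (by norm_num) (by norm_num) he)
    have b6 : t.drop (t.length - 4) ≠ ['s', 'i', 'x'] :=
      fun he => h6 (drop_absorb (by norm_num) (by norm_num) he)
    have c1 : t.drop (t.length - 5) ≠ ['o', 'n', 'e'] :=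
      fun he => h1 (drop_absorb (by norm_num) (by norm_num) he)
    have c2 : t.drop (t.length - 5) ≠ ['t', 'w', 'o'] :=
      fun he => h2 (drop_absorb (by norm_num) (by norm_num) he)
    have c6 : t.drop (t.length - 5) ≠ ['s', 'i', 'x'] :=
      fun he => h6 (drop_absorb (by norm_num) (by norm_num) he)
    have c4 : t.drop (t.length - 5) ≠ ['f', 'o', 'u', 'r'] :=
      fun he => h4 (drop_absorb (by norm_num) (by norm_num) he)
    have c5 : t.drop (t.length - 5) ≠ ['f', 'i', 'v', 'e'] :=
      fun he => h5 (drop_absorb (by norm_num) (by norm_num) he)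
    have c9 : t.drop (t.length - 5) ≠ ['n', 'i', 'n', 'e'] :=
      fun he => h9 (drop_absorb (by norm_num) (by norm_num) he)
    simp [h1, h2, h3, h4, h5, h6, h7, h8, h9, b1, b2, b6, c1, c2, c6, c4, c5, c9]

theorem get_subline_number_main (s : String) (b : Bool) :
    get_subline_number s b = get_subline_number_alt s b := by
  cases b
  · rw [A_false, B_false]
    exact key_false s.toList
  · rw [A_true, B_true]
    exact key_true s.toList

-- ===== VERDICT (by name: the statement is the Claim_ definition above) =====
theorem get_subline_number_spec : Claim_equal_get_subline_number := by
  intro s b _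
  unfold Spec_get_subline_number
  exact get_subline_number_main s b
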